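-- pv_equiv track=rewrite | github.com/henishborad/DSA-Refresher | one.py | solution
-- ===== SOURCE A (Python) =====
-- def solution(commands):
--     position = 0
--     for command in commands:
--         if command == "L":
--             position -= 1
--         elif command == "R":
--             position += 1
--
--     if position < 0:
--         return "L"
--     elif position > 0:
--         return "R"
--     else:
--         return ""
-- ===== SOURCE B (Python) =====
-- def solution(commands):
--     # Stack-based cancellation: opposite moves annihilate; whatever symbol
--     # survives on the stack is the net direction.
--     stack = []
--     for c in commands:
--         if c in ("L", "R"):
--             if stack and stack[-1] != c:
--                 stack.pop()
--             else:
--                 stack.append(c)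
--     return stack[0] if stack else ""
-- ===== Notes on version B (the rewrite author's own statement) =====
-- stated objective: alternative
-- what changed: Replaces the signed position counter with a cancellation stack (opposite adjacent moves annihilate, like parenthesis matching); the surviving stack symbol, if any, is the answer.
import Mathlib
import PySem

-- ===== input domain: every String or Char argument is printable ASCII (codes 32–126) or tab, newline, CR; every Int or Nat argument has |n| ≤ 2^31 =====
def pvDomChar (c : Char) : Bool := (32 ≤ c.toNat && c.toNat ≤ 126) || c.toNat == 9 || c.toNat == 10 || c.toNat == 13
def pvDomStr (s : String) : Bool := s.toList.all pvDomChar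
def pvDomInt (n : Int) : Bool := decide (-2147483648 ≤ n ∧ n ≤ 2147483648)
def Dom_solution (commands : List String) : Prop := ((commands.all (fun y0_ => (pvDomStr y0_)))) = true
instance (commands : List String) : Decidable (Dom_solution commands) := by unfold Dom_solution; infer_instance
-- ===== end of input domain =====

-- B replaces A's signed counter with a cancellation stack (opposite moves annihilate); same cost, different state.

-- ===== PORT A =====
def solution (commands : List String) : String :=
  let position : Int := commands.foldl (fun position command =>
    if command = "L" then position - 1
    else if command = "R" then position + 1
    else position) 0
  if position < 0 then "L"
  else if position > 0 then "R"
  else ""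

-- ===== PORT B =====
def solutionAltStep (stack : List String) (c : String) : List String :=
  if c = "L" ∨ c = "R" then
    if stack ≠ [] ∧ stack.getLast? ≠ some c then stack.dropLast
    else stack ++ [c]
  else stack

def solution_alt (commands : List String) : String :=
  let stack := commands.foldl solutionAltStep []
  match stack with
  | [] => ""
  | x :: _ => x

-- ===== PRECONDITION & SPEC =====
def Spec_solution (commands : List String) (out : String) : Prop := out = solution_alt commands
instance (commands : List String) (out : String) : Decidable (Spec_solution commands out) := by unfold Spec_solution; infer_instance

-- ===== CLAIM (what is proved, stated in full; the proofs are below) =====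
def Claim_equal_solution : Prop := ∀ (commands : List String), Dom_solution commands → Spec_solution commands (solution commands)

-- ===== LEMMAS AND PROOFS =====

-- Invariant: B's stack is fully determined by A's position: it is |pos| copies
-- of the direction symbol of pos.
def stackOf (pos : Int) : List String :=
  List.replicate pos.natAbs (if pos < 0 then "L" else "R")

theorem step_inv (pos : Int) (c : String) :
    solutionAltStep (stackOf pos) c =
      stackOf (if c = "L" then pos - 1 else if c = "R" then pos + 1 else pos) := by
  by_cases hL : c = "L" <;> by_cases hR : c = "R" <;>
    simp_all [solutionAltStep, stackOf]
  · -- c = "L"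
    rcases lt_trichotomy pos 0 with h | h | h
    · have habs : (pos - 1).natAbs = pos.natAbs + 1 := by omega
      simp [habs, List.getLast?_replicate, List.replicate_succ', h,
        show pos < 1 by omega]
    · subst h; simp [List.replicate_succ']
    · have hne : pos.natAbs ≠ 0 := by omega
      have hlast : (List.replicate pos.natAbs ("R":String)).getLast? = some "R" := by
        simp [List.getLast?_replicate, hne]
      have habs : (pos - 1).natAbs = pos.natAbs - 1 := by omega
      simp [show ¬ pos < 0 by omega, hlast, habs, show pos ≠ 0 by omega, show ¬ pos < 1 by omega]
  · -- c = "R"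
    rcases lt_trichotomy pos 0 with h | h | h
    · have hne : pos.natAbs ≠ 0 := by omega
      have hlast : (List.replicate pos.natAbs ("L":String)).getLast? = some "L" := by
        simp [List.getLast?_replicate, hne]
      have habs : (pos + 1).natAbs = pos.natAbs - 1 := by omega
      by_cases h1 : pos + 1 < 0 <;>
        simp [h, hlast, habs, h1,
          show pos ≠ 0 by omega]
      simp [show pos.natAbs - 1 = 0 by omega]
    · subst h; simp [List.replicate_succ']
    · have habs : (pos + 1).natAbs = pos.natAbs + 1 := by omega
      simp [show ¬ pos < 0 by omega, show ¬ pos + 1 < 0 by omega, habs,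
        List.getLast?_replicate, List.replicate_succ']

theorem fold_inv (commands : List String) (pos : Int) :
    commands.foldl solutionAltStep (stackOf pos) =
      stackOf (commands.foldl (fun position command =>
        if command = "L" then position - 1
        else if command = "R" then position + 1
        else position) pos) := by
  induction commands generalizing pos with
  | nil => rfl
  | cons c cs ih => simp only [List.foldl_cons, step_inv, ih]

-- ===== VERDICT (by name: the statement is the Claim_ definition above) =====
theorem solution_spec : Claim_equal_solution := by
  intro commands _
  unfold Spec_solution solution solution_alt
  have h0 : ([] : List String) = stackOf 0 := by simp [stackOf]
  rw [h0, fold_inv]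
  set p : Int := commands.foldl (fun position command =>
    if command = "L" then position - 1
    else if command = "R" then position + 1
    else position) 0 with hp
  rcases lt_trichotomy p 0 with h | h | h
  · obtain ⟨k, hk⟩ : ∃ k, p.natAbs = k + 1 := ⟨p.natAbs - 1, by omega⟩
    simp [stackOf, h, hk, List.replicate_succ]
  · simp [stackOf, h]
  · obtain ⟨k, hk⟩ : ∃ k, p.natAbs = k + 1 := ⟨p.natAbs - 1, by omega⟩
    simp [stackOf, h, hk, List.replicate_succ, show ¬ p < 0 by omega]
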